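-- pv_equiv track=rewrite | github.com/loganyu/leetcode | solutions/044_wildcard_matching.py | remove_duplicate_stars
-- ===== SOURCE A (Python) =====
-- def remove_duplicate_stars(p: str) -> str:
--     if p == '':
--         return p
--     p1 = [p[0],]
--     for x in p[1:]:
--         if p1[-1] != '*' or p1[-1] == '*' and x != '*':
--             p1.append(x)
--     return ''.join(p1)
-- ===== SOURCE B (Python) =====
-- from itertools import groupby
--
-- def remove_duplicate_stars(p: str) -> str:
--     return ''.join('*' if k == '*' else ''.join(g) for k, g in groupby(p))
-- ===== Notes on version B (the rewrite author's own statement) =====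
-- stated objective: idiomatic
-- what changed: Replaces A's incremental last-appended-char comparison loop with itertools.groupby: split p into maximal runs of equal characters, emit a single star for a star run and the whole run otherwise, then join.
import Mathlib
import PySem

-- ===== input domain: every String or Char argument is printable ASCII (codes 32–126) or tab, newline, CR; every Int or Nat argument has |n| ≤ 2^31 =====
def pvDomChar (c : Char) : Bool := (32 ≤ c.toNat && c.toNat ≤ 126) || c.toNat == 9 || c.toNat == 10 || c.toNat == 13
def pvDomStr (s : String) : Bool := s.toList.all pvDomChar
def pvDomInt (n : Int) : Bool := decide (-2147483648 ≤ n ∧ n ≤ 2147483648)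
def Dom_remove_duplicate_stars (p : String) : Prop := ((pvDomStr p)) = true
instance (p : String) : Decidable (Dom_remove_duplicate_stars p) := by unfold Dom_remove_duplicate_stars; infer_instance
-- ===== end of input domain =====

-- B replaces A's incremental last-appended-char comparison with an itertools.groupby
-- decomposition into maximal runs (a single '*' per star run, the full run otherwise); idiomatic, same cost.


-- ===== PORT A =====
-- Literal port of A: if p == '' return p; p1 = [p[0]]; for x in p[1:]: append x unless
-- (p1[-1] == '*' and x == '*'); return ''.join(p1).
def remove_duplicate_stars (p : String) : String :=
  match p.toList with
  | [] => p
  | c :: rest =>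
    let p1 := rest.foldl (fun p1 x =>
      let last := p1.getLast?.getD ' '   -- p1 is never empty, so the default is never read
      if last ≠ '*' ∨ (last = '*' ∧ x ≠ '*') then p1 ++ [x] else p1) [c]
    String.ofList p1

-- ===== PORT B =====
-- itertools.groupby(p): maximal runs of equal characters, as (key, run) pairs.
def pyGroupby : List Char → List (Char × List Char)
  | [] => []
  | c :: rest =>
    let s := rest.span (· = c)
    (c, c :: s.1) :: pyGroupby s.2
termination_by l => l.length
decreasing_by
  simp only [List.span_eq_takeWhile_dropWhile] at *
  have := List.length_dropWhile_le (· = c) rest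
  simp; omega

def remove_duplicate_stars_alt (p : String) : String :=
  String.ofList ((pyGroupby p.toList).flatMap (fun g => if g.1 = '*' then ['*'] else g.2))

-- ===== PRECONDITION & SPEC =====
def Spec_remove_duplicate_stars (p : String) (out : String) : Prop := out = remove_duplicate_stars_alt p
instance (p : String) (out : String) : Decidable (Spec_remove_duplicate_stars p out) := by unfold Spec_remove_duplicate_stars; infer_instance

-- ===== CLAIM (what is proved, stated in full; the proofs are below) =====
def Claim_equal_remove_duplicate_stars : Prop := ∀ (p : String), Dom_remove_duplicate_stars p → Spec_remove_duplicate_stars p (remove_duplicate_stars p)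

-- ===== LEMMAS AND PROOFS =====

-- Functional characterisation of A's loop body result, parametrised by the last appended char.
def coll (lc : Char) : List Char → List Char
  | [] => []
  | x :: xs => if lc = '*' ∧ x = '*' then coll lc xs else x :: coll x xs

theorem foldl_eq_coll (l : List Char) : ∀ (acc : List Char) (lc : Char),
    acc.getLast? = some lc →
    l.foldl (fun p1 x =>
      let last := p1.getLast?.getD ' '
      if last ≠ '*' ∨ (last = '*' ∧ x ≠ '*') then p1 ++ [x] else p1) acc
      = acc ++ coll lc l := by
  induction l with
  | nil => intro acc lc _; simp [coll]
  | cons x xs ih =>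
    intro acc lc h
    simp only [List.foldl_cons, coll, h]
    by_cases hc : lc = '*' ∧ x = '*'
    · have : ¬ ((Option.getD (some lc) ' ') ≠ '*' ∨ ((Option.getD (some lc) ' ') = '*' ∧ x ≠ '*')) := by
        simp [hc.1, hc.2]
      simp only [this, if_pos hc]
      exact ih acc lc h
    · have hcond : ((Option.getD (some lc) ' ') ≠ '*' ∨ ((Option.getD (some lc) ' ') = '*' ∧ x ≠ '*')) := by
        simp only [Option.getD]
        by_cases h1 : lc = '*'
        · right; exact ⟨h1, fun hx => hc ⟨h1, hx⟩⟩
        · left; exact h1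
      simp only [if_pos hcond, if_neg hc]
      rw [ih (acc ++ [x]) x (by simp)]
      simp

theorem coll_skip_stars (run : List Char) (rest : List Char)
    (h : ∀ y ∈ run, y = '*') : coll '*' (run ++ rest) = coll '*' rest := by
  induction run with
  | nil => rfl
  | cons y ys ih =>
    have hy : y = '*' := h y (by simp)
    simp only [List.cons_append, coll, hy, and_self, if_pos]
    exact ih (fun z hz => h z (by simp [hz]))

theorem coll_copy_run (c : Char) (hc : c ≠ '*') (run : List Char) (rest : List Char)
    (h : ∀ y ∈ run, y = c) : coll c (run ++ rest) = run ++ coll c rest := by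
  induction run with
  | nil => rfl
  | cons y ys ih =>
    have hy : y = c := h y (by simp)
    subst hy
    simp only [List.cons_append, coll]
    rw [if_neg (fun hx => hc hx.1), ih (fun z hz => h z (by simp [hz]))]

theorem dropWhile_head_false {p : Char → Bool} {l : List Char} {y : Char} {ys : List Char}
    (h : l.dropWhile p = y :: ys) : p y = false := by
  induction l with
  | nil => simp at h
  | cons a as ih =>
    by_cases ha : p a
    · rw [List.dropWhile_cons_of_pos ha] at h; exact ih h
    · rw [List.dropWhile_cons_of_neg ha] at h
      cases h; simpa using ha

theorem coll_eq_groupby (n : ℕ) : ∀ (l : List Char), l.length ≤ n → ∀ (c : Char),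
    c :: coll c l = (pyGroupby (c :: l)).flatMap (fun g => if g.1 = '*' then ['*'] else g.2) := by
  induction n with
  | zero =>
    intro l hl c
    have : l = [] := List.length_eq_zero_iff.mp (Nat.le_zero.mp hl)
    subst this
    simp only [coll, pyGroupby, List.span_eq_takeWhile_dropWhile, List.takeWhile_nil,
      List.dropWhile_nil, List.flatMap_cons, List.flatMap_nil, List.append_nil]
    by_cases hc : c = '*' <;> simp [hc]
  | succ n ih =>
    intro l hl c
    simp only [pyGroupby, List.span_eq_takeWhile_dropWhile, List.flatMap_cons]
    have hsplit : l.takeWhile (· = c) ++ l.dropWhile (· = c) = l := List.takeWhile_append_dropWhile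
    have hmem : ∀ y ∈ l.takeWhile (· = c), y = c := by
      intro y hy; simpa using List.mem_takeWhile_imp hy
    by_cases hc : c = '*'
    · subst hc
      have hcoll : coll '*' l = coll '*' (l.dropWhile (· = '*')) := by
        conv_lhs => rw [← hsplit]
        exact coll_skip_stars _ _ hmem
      cases hr : l.dropWhile (· = '*') with
      | nil => rw [hcoll, hr]; simp [coll, pyGroupby]
      | cons y ys =>
        have hy : y ≠ '*' := by simpa using dropWhile_head_false hr
        have hlen : ys.length ≤ n := by
          have h1 := List.length_dropWhile_le (· = '*') l
          rw [hr] at h1; simp at h1; omega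
        have := ih ys hlen y
        simp only [hcoll, hr, coll]
        rw [if_neg (fun hx => hy hx.2)]
        simp only [if_true]
        simpa using this
    · have hcoll : coll c l = l.takeWhile (· = c) ++ coll c (l.dropWhile (· = c)) := by
        conv_lhs => rw [← hsplit]
        exact coll_copy_run c hc _ _ hmem
      cases hr : l.dropWhile (· = c) with
      | nil => rw [hcoll, hr]; simp [coll, pyGroupby, hc]
      | cons y ys =>
        have hy : y ≠ c := by simpa using dropWhile_head_false hr
        have hlen : ys.length ≤ n := by
          have h1 := List.length_dropWhile_le (· = c) l
          rw [hr] at h1; simp at h1; omega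
        have hrec := ih ys hlen y
        simp only [hcoll, hr, coll]
        rw [if_neg (fun hx => hc hx.1)]
        simp only [if_neg hc, List.cons_append, List.cons.injEq, true_and]
        rw [hrec]

-- ===== VERDICT (by name: the statement is the Claim_ definition above) =====
theorem remove_duplicate_stars_spec : Claim_equal_remove_duplicate_stars := by
  intro p _
  unfold Spec_remove_duplicate_stars remove_duplicate_stars remove_duplicate_stars_alt
  cases hl : p.toList with
  | nil =>
    have hp := String.ofList_toList (s := p)
    simp only [pyGroupby, List.flatMap_nil]
    rw [← hp, hl]
  | cons c rest =>
    dsimp only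
    rw [foldl_eq_coll rest [c] c (by simp)]
    rw [List.singleton_append]
    rw [coll_eq_groupby rest.length rest (le_refl _) c]
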